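-- pv_equiv track=rewrite | github.com/scrythe/it_learns_maze | game/maze/create_maze.py | transform_maze
-- ===== SOURCE A (Python) =====
-- def transform_maze(maze):
--     maze_size = len(maze)
--     new_maze_size = maze_size * 2 - 1
--     new_maze = []
--     for _ in range(new_maze_size):
--         row = [0] * (new_maze_size)
--         new_maze.append(row)
--     for ir, maze_row in enumerate(maze):
--         for ic, maze_cell in enumerate(maze_row):
--             if (2 * ic + 1) < new_maze_size and maze_cell[0]:  # east
--                 new_maze[2 * ir][2 * ic + 1] = 1
--             if (2 * ir + 1) < new_maze_size and maze_cell[1]:  # south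
--                 new_maze[2 * ir + 1][2 * ic] = 1
--             if (2 * ir + 1) < new_maze_size and (2 * ic + 1) < new_maze_size:
--                 new_maze[2 * ir + 1][2 * ic + 1] = 1  # corner
--
--     return new_maze
-- ===== SOURCE B (Python) =====
-- def transform_maze(maze):
--     size = 2 * len(maze) - 1
--
--     def val(r, c):
--         if r % 2 == 0 and c % 2 == 0:
--             return 0
--         row = maze[r // 2]
--         cell = row[c // 2] if c // 2 < len(row) else None
--         if cell is None:
--             return 0
--         if r % 2 == 0:
--             return 1 if cell[0] else 0
--         if c % 2 == 0:
--             return 1 if cell[1] else 0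
--         return 1
--
--     return [[val(r, c) for c in range(size)] for r in range(size)]
-- ===== Notes on version B (the rewrite author's own statement) =====
-- stated objective: simpler
-- what changed: B gathers each output entry from its unique source cell via one nested comprehension over output coordinates, instead of A's allocate-then-scatter with mutation and bounds guards.
-- crash fix: On ragged mazes where some non-last row has a cell at column index >= len(maze) with nonzero south bit, A raises IndexError (out-of-range write new_maze[2*ir+1][2*ic]); B returns the doubled grid with such out-of-range cells ignored. — e.g. on transform_maze([[(0, 0), (0, 0), (0, 1)], [(0, 0)]]): A raises IndexError, B returns [[0, 0, 0], [0, 1, 0], [0, 0, 0]]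
import Mathlib
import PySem

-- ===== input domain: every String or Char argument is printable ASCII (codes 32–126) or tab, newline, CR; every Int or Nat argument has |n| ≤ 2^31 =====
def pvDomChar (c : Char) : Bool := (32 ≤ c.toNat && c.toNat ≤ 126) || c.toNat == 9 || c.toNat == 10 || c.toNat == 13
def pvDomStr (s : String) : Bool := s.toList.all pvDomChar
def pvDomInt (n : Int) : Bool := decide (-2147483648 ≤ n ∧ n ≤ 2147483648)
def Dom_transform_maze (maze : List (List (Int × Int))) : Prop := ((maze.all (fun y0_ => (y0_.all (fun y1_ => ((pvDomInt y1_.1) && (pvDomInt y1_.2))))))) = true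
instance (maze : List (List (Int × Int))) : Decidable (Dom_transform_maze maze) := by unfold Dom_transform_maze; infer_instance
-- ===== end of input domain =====

set_option maxHeartbeats 1000000


-- B builds the doubled grid by gathering each output entry from its unique source cell
-- (one nested comprehension over output coordinates) instead of A's allocate-then-scatter
-- with in-place mutation and bounds guards.

-- ===== PORT A =====
-- Python `new_maze[r][c] = 1` (indices here are always ≥ 0; on the admitted inputs the
-- write is in range wherever Python's is; an out-of-range write is a no-op where Python
-- would raise IndexError — exactly those inputs are excluded by Pre_transform_maze).
def pySet2 (m : List (List Int)) (r c : Int) : List (List Int) :=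
  m.set r.toNat ((m.getD r.toNat []).set c.toNat 1)

-- body of A's inner loop: the three guarded writes for one cell (ic, maze_cell)
def stepCell (s ir : Int) (nm : List (List Int)) (p : Int × (Int × Int)) : List (List Int) :=
  let ic := p.1
  let cell := p.2
  let nm1 := if 2 * ic + 1 < s ∧ cell.1 ≠ 0 then pySet2 nm (2 * ir) (2 * ic + 1) else nm
  let nm2 := if 2 * ir + 1 < s ∧ cell.2 ≠ 0 then pySet2 nm1 (2 * ir + 1) (2 * ic) else nm1
  if 2 * ir + 1 < s ∧ 2 * ic + 1 < s then pySet2 nm2 (2 * ir + 1) (2 * ic + 1) else nm2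

def transform_maze (maze : List (List (Int × Int))) : List (List Int) :=
  let maze_size : Int := (maze.length : Int)
  let new_maze_size : Int := maze_size * 2 - 1
  -- `[0] * new_maze_size` is replicate of new_maze_size.toNat zeros ([] when negative, as in Python)
  let new_maze : List (List Int) :=
    (PySem.List.pyRange 0 new_maze_size 1).foldl
      (fun acc _ => acc ++ [List.replicate new_maze_size.toNat (0 : Int)]) []
  (PySem.List.enumerate maze).foldl
    (fun nm q => (PySem.List.enumerate q.2).foldl (stepCell new_maze_size q.1) nm) new_maze

-- ===== PORT B =====
-- Source B's val(r, c): gather the entry at output coordinate (r, c) from its source cell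
def pvVal (maze : List (List (Int × Int))) (r c : Nat) : Int :=
  if r % 2 = 0 ∧ c % 2 = 0 then 0
  else
    let row := maze.getD (r / 2) []
    match row[c / 2]? with
    | none => 0
    | some cell =>
      if r % 2 = 0 then (if cell.1 ≠ 0 then 1 else 0)
      else if c % 2 = 0 then (if cell.2 ≠ 0 then 1 else 0)
      else 1

-- `range(size)` = the naturals below size (empty when size = 2*0 - 1 < 0, as in Python)
def transform_maze_alt (maze : List (List (Int × Int))) : List (List Int) :=
  let size : Nat := 2 * maze.length - 1
  (List.range size).map (fun r => (List.range size).map (fun c => pvVal maze r c))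

-- ===== PRECONDITION & SPEC =====
-- Pre_ excludes exactly the inputs on which Python A raises IndexError: a ragged maze where
-- some non-last row has a cell at column index ≥ len(maze) with nonzero south bit.
def Pre_transform_maze (maze : List (List (Int × Int))) : Prop :=
  ∀ row ∈ maze.take (maze.length - 1), ∀ p ∈ row.drop maze.length, p.2 = 0
instance (maze : List (List (Int × Int))) : Decidable (Pre_transform_maze maze) := by
  unfold Pre_transform_maze; infer_instance

def pvWitness_transform_maze : (List (List (Int × Int))) := [[(1, 1), (0, 1)], [(1, 0), (0, 0)]]

-- On ragged mazes where some non-last row has a cell at column index ≥ len(maze) with nonzero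
-- south bit, A raises IndexError (out-of-range write); B returns the grid with such cells ignored.
def Raises_transform_maze (maze : List (List (Int × Int))) : Prop :=
  ∃ row ∈ maze.take (maze.length - 1), ∃ p ∈ row.drop maze.length, p.2 ≠ 0
instance (maze : List (List (Int × Int))) : Decidable (Raises_transform_maze maze) := by
  unfold Raises_transform_maze; infer_instance

def pvRaiseWitness_transform_maze : (List (List (Int × Int))) := [[(0, 0), (0, 0), (0, 1)], [(0, 0)]]
def pvRaiseWitnessOut_transform_maze : List (List Int) := [[0, 0, 0], [0, 1, 0], [0, 0, 0]]

def Spec_transform_maze (maze : List (List (Int × Int))) (out : List (List Int)) : Prop := out = transform_maze_alt maze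
instance (maze : List (List (Int × Int))) (out : List (List Int)) : Decidable (Spec_transform_maze maze out) := by unfold Spec_transform_maze; infer_instance

-- ===== CLAIM (what is proved, stated in full; the proofs are below) =====
def Claim_equal_transform_maze : Prop := ∀ (maze : List (List (Int × Int))), Dom_transform_maze maze → Pre_transform_maze maze → Spec_transform_maze maze (transform_maze maze)

def Claim_raises_transform_maze : Prop := (∀ (maze : List (List (Int × Int))), Dom_transform_maze maze → Raises_transform_maze maze → ¬ Pre_transform_maze maze) ∧ (Dom_transform_maze (pvRaiseWitness_transform_maze) ∧ Raises_transform_maze (pvRaiseWitness_transform_maze) ∧ transform_maze_alt (pvRaiseWitness_transform_maze) = pvRaiseWitnessOut_transform_maze)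

-- ===== LEMMAS AND PROOFS =====

-- the entry of the grid at (r, c), with default 0
def entry (m : List (List Int)) (r c : Nat) : Int := (m.getD r []).getD c 0

-- whether processing cell (ic, cell) of row ir writes a 1 at output coordinate (r, c)
abbrev parityCond (cell : Int × Int) (r c : Nat) : Prop :=
  (r % 2 = 0 ∧ c % 2 = 1 ∧ cell.1 ≠ 0) ∨ (r % 2 = 1 ∧ c % 2 = 0 ∧ cell.2 ≠ 0) ∨ (r % 2 = 1 ∧ c % 2 = 1)

theorem getD_set (l : List Int) (i j : Nat) (a d : Int) :
    (l.set i a).getD j d = if i = j ∧ i < l.length then a else l.getD j d := by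
  simp only [List.getD_eq_getElem?_getD, List.getElem?_set]
  split_ifs <;> simp_all <;> omega

theorem getD_set2 (l : List (List Int)) (i j : Nat) (a : List Int) :
    (l.set i a).getD j [] = if i = j ∧ i < l.length then a else l.getD j [] := by
  simp only [List.getD_eq_getElem?_getD, List.getElem?_set]
  split_ifs <;> simp_all <;> omega

theorem length_pySet2 (m : List (List Int)) (r c : Int) : (pySet2 m r c).length = m.length := by
  simp [pySet2]

theorem rowlen_pySet2 (m : List (List Int)) (r c : Int) (r' : Nat) :
    ((pySet2 m r c).getD r' []).length = (m.getD r' []).length := by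
  rw [pySet2, getD_set2]
  split_ifs with h
  · obtain ⟨h1, _⟩ := h; subst h1; simp
  · rfl

theorem mem_set_strong {α : Type} (l : List α) (n : Nat) (b a : α) (h : a ∈ l.set n b) :
    a ∈ l ∨ (n < l.length ∧ a = b) := by
  by_cases hn : n < l.length
  · rcases List.mem_or_eq_of_mem_set h with h' | h' <;> tauto
  · left; rwa [List.set_eq_of_length_le (by omega)] at h

theorem shape_pySet2 (m : List (List Int)) (sN : Nat) (h : ∀ x ∈ m, x.length = sN) (r c : Int) :
    ∀ x ∈ pySet2 m r c, x.length = sN := by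
  intro x hx
  rw [pySet2] at hx
  rcases mem_set_strong _ _ _ _ hx with h' | ⟨hlt, h'⟩
  · exact h _ h'
  · subst h'
    rw [List.length_set, List.getD_eq_getElem _ [] hlt]
    exact h _ (List.getElem_mem _)

theorem entry_pySet2N (m : List (List Int)) (r0 c0 r c : Nat) :
    entry (pySet2 m (r0 : Int) (c0 : Int)) r c =
      if r = r0 ∧ c = c0 ∧ r0 < m.length ∧ c0 < (m.getD r0 []).length then 1 else entry m r c := by
  rw [entry, pySet2]
  simp only [Int.toNat_natCast]
  rw [getD_set2]
  split_ifs with h1 h2 h2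
  · obtain ⟨hr, _⟩ := h1; subst hr
    rw [getD_set]
    rw [if_pos ⟨h2.2.1.symm, h2.2.2.2⟩]
  · obtain ⟨hr, hlen⟩ := h1
    rw [getD_set]
    rw [if_neg (show ¬((c0 : Nat) = c ∧ c0 < (m.getD r0 []).length) from by
      rintro ⟨a, b⟩; exact h2 ⟨hr.symm, a.symm, hlen, b⟩)]
    rw [entry, hr]
  · exact absurd ⟨h2.1.symm, h2.2.2.1⟩ h1
  · rfl

theorem length_stepCell (s ir : Int) (nm : List (List Int)) (p : Int × (Int × Int)) :
    (stepCell s ir nm p).length = nm.length := by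
  rw [stepCell]
  split_ifs <;> simp [length_pySet2]

theorem rows_stepCell (s ir : Int) (nm : List (List Int)) (p : Int × (Int × Int)) (sN : Nat)
    (h : ∀ x ∈ nm, x.length = sN) : ∀ x ∈ stepCell s ir nm p, x.length = sN := by
  rw [stepCell]
  split_ifs <;> (repeat apply shape_pySet2) <;> exact h

theorem entry_stepCell (sN : Nat) (ir ic : Nat) (cell : Int × Int) (nm : List (List Int))
    (hlen : nm.length = sN) (hrow : ∀ x ∈ nm, x.length = sN)
    (r c : Nat) (hr : r < sN) (hc : c < sN) :
    entry (stepCell (sN : Int) (ir : Int) nm ((ic : Int), cell)) r c =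
      if r / 2 = ir ∧ c / 2 = ic ∧ parityCond cell r c then 1 else entry nm r c := by
  have hL : ∀ k : Nat, (nm.getD k []).length = if k < sN then sN else 0 := by
    intro k
    split_ifs with hk
    · rw [List.getD_eq_getElem _ [] (by omega)]
      exact hrow _ (List.getElem_mem _)
    · rw [List.getD_eq_default _ [] (by omega)]
      rfl
  have e1 : (2 * (ir : Int)) = ((2 * ir : Nat) : Int) := by push_cast; ring
  have e2 : (2 * (ic : Int) + 1) = ((2 * ic + 1 : Nat) : Int) := by push_cast; ring
  have e3 : (2 * (ir : Int) + 1) = ((2 * ir + 1 : Nat) : Int) := by push_cast; ring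
  have e4 : (2 * (ic : Int)) = ((2 * ic : Nat) : Int) := by push_cast; ring
  simp only [stepCell, parityCond, e2, e3]
  simp only [e1, e4]
  split_ifs <;>
    (try simp only [entry_pySet2N, length_pySet2, rowlen_pySet2, hlen, hL]) <;>
    (try split_ifs) <;> first | rfl | (exfalso; omega)

theorem foldl_shape {β : Type} (f : List (List Int) → β → List (List Int)) (sN : Nat)
    (hf : ∀ nm b, (f nm b).length = nm.length ∧
      ((∀ x ∈ nm, x.length = sN) → ∀ x ∈ f nm b, x.length = sN)) :
    ∀ (l : List β) (nm : List (List Int)),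
      (l.foldl f nm).length = nm.length ∧
        ((∀ x ∈ nm, x.length = sN) → ∀ x ∈ l.foldl f nm, x.length = sN) := by
  intro l
  induction l with
  | nil => intro nm; exact ⟨rfl, fun h => h⟩
  | cons hd tl ih =>
    intro nm
    simp only [List.foldl_cons]
    refine ⟨(ih (f nm hd)).1.trans (hf nm hd).1, fun h => (ih (f nm hd)).2 ((hf nm hd).2 h)⟩

theorem inner_entry (sN : Nat) (ir : Nat) (row : List (Int × Int)) :
    ∀ (j : Nat) (nm : List (List Int)), nm.length = sN → (∀ x ∈ nm, x.length = sN) →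
    ∀ (r c : Nat), r < sN → c < sN →
    entry ((PySem.List.enumerate row (j : Int)).foldl (stepCell (sN : Int) (ir : Int)) nm) r c =
      if r / 2 = ir ∧ j ≤ c / 2 ∧ c / 2 < j + row.length ∧ parityCond (row.getD (c / 2 - j) (0, 0)) r c
      then 1 else entry nm r c := by
  induction row with
  | nil =>
    intro j nm hlen hrow r c hr hc
    rw [PySem.List.enumerate_nil, List.foldl_nil,
      if_neg (by rintro ⟨_, h1, h2, _⟩; simp only [List.length_nil] at h2; omega)]
  | cons hd tl ih =>
    intro j nm hlen hrow r c hr hc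
    rw [PySem.List.enumerate_cons, List.foldl_cons]
    have hj1 : ((j : Int) + 1) = ((j + 1 : Nat) : Int) := by push_cast; ring
    rw [hj1]
    rw [ih (j + 1) _ ((length_stepCell _ _ _ _).trans hlen) (rows_stepCell _ _ _ _ _ hrow) r c hr hc]
    rw [entry_stepCell sN ir j hd nm hlen hrow r c hr hc]
    by_cases hcj : c / 2 = j
    · rw [if_neg (show ¬(r / 2 = ir ∧ j + 1 ≤ c / 2 ∧ c / 2 < j + 1 + tl.length ∧
          parityCond (tl.getD (c / 2 - (j + 1)) (0, 0)) r c) from by rintro ⟨_, h1, _⟩; omega)]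
      have hgd : (hd :: tl).getD (c / 2 - j) (0, 0) = hd := by rw [hcj]; simp
      rw [hgd]
      have hiff : (r / 2 = ir ∧ c / 2 = j ∧ parityCond hd r c) ↔
          (r / 2 = ir ∧ j ≤ c / 2 ∧ c / 2 < j + (hd :: tl).length ∧ parityCond hd r c) := by
        constructor
        · rintro ⟨a, b, d⟩
          exact ⟨a, by omega, by simp only [List.length_cons]; omega, d⟩
        · rintro ⟨a, _, _, d⟩
          exact ⟨a, hcj, d⟩
      rw [if_congr hiff rfl rfl]
    · by_cases hgt : j < c / 2
      · rw [if_neg (show ¬(r / 2 = ir ∧ c / 2 = j ∧ parityCond hd r c) from by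
          rintro ⟨_, h1, _⟩; omega)]
        have hgd : (hd :: tl).getD (c / 2 - j) (0, 0) = tl.getD (c / 2 - (j + 1)) (0, 0) := by
          have h : c / 2 - j = (c / 2 - (j + 1)) + 1 := by omega
          rw [h]; rfl
        rw [hgd]
        have hiff : (r / 2 = ir ∧ j + 1 ≤ c / 2 ∧ c / 2 < j + 1 + tl.length ∧
              parityCond (tl.getD (c / 2 - (j + 1)) (0, 0)) r c) ↔
            (r / 2 = ir ∧ j ≤ c / 2 ∧ c / 2 < j + (hd :: tl).length ∧
              parityCond (tl.getD (c / 2 - (j + 1)) (0, 0)) r c) := by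
          constructor <;> rintro ⟨a, b, d, e⟩ <;>
            exact ⟨a, by omega, by simp only [List.length_cons] at *; omega, e⟩
        rw [if_congr hiff rfl rfl]
      · rw [if_neg (show ¬(r / 2 = ir ∧ j + 1 ≤ c / 2 ∧ c / 2 < j + 1 + tl.length ∧
            parityCond (tl.getD (c / 2 - (j + 1)) (0, 0)) r c) from by rintro ⟨_, h1, _⟩; omega),
          if_neg (show ¬(r / 2 = ir ∧ c / 2 = j ∧ parityCond hd r c) from by
            rintro ⟨_, h1, _⟩; omega),
          if_neg (show ¬(r / 2 = ir ∧ j ≤ c / 2 ∧ c / 2 < j + (hd :: tl).length ∧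
            parityCond ((hd :: tl).getD (c / 2 - j) (0, 0)) r c) from by rintro ⟨_, h1, _⟩; omega)]

theorem outer_entry (sN : Nat) (rows : List (List (Int × Int))) :
    ∀ (i : Nat) (nm : List (List Int)), nm.length = sN → (∀ x ∈ nm, x.length = sN) →
    ∀ (r c : Nat), r < sN → c < sN →
    entry ((PySem.List.enumerate rows (i : Int)).foldl
        (fun nm q => (PySem.List.enumerate q.2).foldl (stepCell (sN : Int) q.1) nm) nm) r c =
      if i ≤ r / 2 ∧ r / 2 < i + rows.length ∧
          (c / 2 < (rows.getD (r / 2 - i) []).length ∧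
            parityCond ((rows.getD (r / 2 - i) []).getD (c / 2) (0, 0)) r c)
      then 1 else entry nm r c := by
  induction rows with
  | nil =>
    intro i nm hlen hrow r c hr hc
    rw [PySem.List.enumerate_nil, List.foldl_nil,
      if_neg (by rintro ⟨h1, h2, _⟩; simp only [List.length_nil] at h2; omega)]
  | cons hd tl ih =>
    intro i nm hlen hrow r c hr hc
    rw [PySem.List.enumerate_cons, List.foldl_cons]
    have hinner := inner_entry sN i hd 0 nm hlen hrow r c hr hc
    simp only [Nat.cast_zero, Nat.zero_le, true_and, Nat.sub_zero, Nat.zero_add] at hinner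
    have hshape := foldl_shape (stepCell (sN : Int) (i : Int)) sN
      (fun nm b => ⟨length_stepCell _ _ _ _, rows_stepCell _ _ _ _ _⟩) (PySem.List.enumerate hd 0) nm
    have hj1 : ((i : Int) + 1) = ((i + 1 : Nat) : Int) := by push_cast; ring
    rw [hj1, ih (i + 1) _ (hshape.1.trans hlen) (hshape.2 hrow) r c hr hc, hinner]
    by_cases hri : r / 2 = i
    · rw [if_neg (show ¬(i + 1 ≤ r / 2 ∧ r / 2 < i + 1 + tl.length ∧
          (c / 2 < (tl.getD (r / 2 - (i + 1)) []).length ∧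
            parityCond ((tl.getD (r / 2 - (i + 1)) []).getD (c / 2) (0, 0)) r c)) from by
          rintro ⟨h1, _⟩; omega)]
      have hgd : (hd :: tl).getD (r / 2 - i) [] = hd := by rw [hri]; simp
      rw [hgd]
      have hiff : (r / 2 = i ∧ c / 2 < hd.length ∧ parityCond (hd.getD (c / 2) (0, 0)) r c) ↔
          (i ≤ r / 2 ∧ r / 2 < i + (hd :: tl).length ∧
            (c / 2 < hd.length ∧ parityCond (hd.getD (c / 2) (0, 0)) r c)) := by
        constructor
        · rintro ⟨a, b, d⟩
          exact ⟨by omega, by simp only [List.length_cons]; omega, b, d⟩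
        · rintro ⟨_, _, b, d⟩
          exact ⟨hri, b, d⟩
      rw [if_congr hiff rfl rfl]
    · by_cases hgt : i < r / 2
      · rw [if_neg (show ¬(r / 2 = i ∧ c / 2 < hd.length ∧
            parityCond (hd.getD (c / 2) (0, 0)) r c) from by rintro ⟨h1, _⟩; omega)]
        have hgd : (hd :: tl).getD (r / 2 - i) [] = tl.getD (r / 2 - (i + 1)) [] := by
          have h : r / 2 - i = (r / 2 - (i + 1)) + 1 := by omega
          rw [h]; rfl
        rw [hgd]
        have hiff : (i + 1 ≤ r / 2 ∧ r / 2 < i + 1 + tl.length ∧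
              (c / 2 < (tl.getD (r / 2 - (i + 1)) []).length ∧
                parityCond ((tl.getD (r / 2 - (i + 1)) []).getD (c / 2) (0, 0)) r c)) ↔
            (i ≤ r / 2 ∧ r / 2 < i + (hd :: tl).length ∧
              (c / 2 < (tl.getD (r / 2 - (i + 1)) []).length ∧
                parityCond ((tl.getD (r / 2 - (i + 1)) []).getD (c / 2) (0, 0)) r c)) := by
          constructor <;> rintro ⟨a, b, d⟩ <;>
            exact ⟨by omega, by simp only [List.length_cons] at *; omega, d⟩
        rw [if_congr hiff rfl rfl]
      · rw [if_neg (show ¬(i + 1 ≤ r / 2 ∧ r / 2 < i + 1 + tl.length ∧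
            (c / 2 < (tl.getD (r / 2 - (i + 1)) []).length ∧
              parityCond ((tl.getD (r / 2 - (i + 1)) []).getD (c / 2) (0, 0)) r c)) from by
            rintro ⟨h1, _⟩; omega),
          if_neg (show ¬(r / 2 = i ∧ c / 2 < hd.length ∧
            parityCond (hd.getD (c / 2) (0, 0)) r c) from by rintro ⟨h1, _⟩; omega),
          if_neg (show ¬(i ≤ r / 2 ∧ r / 2 < i + (hd :: tl).length ∧
            (c / 2 < ((hd :: tl).getD (r / 2 - i) []).length ∧
              parityCond (((hd :: tl).getD (r / 2 - i) []).getD (c / 2) (0, 0)) r c)) from by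
            rintro ⟨h1, _⟩; omega)]

theorem cons_replicate_eq {β : Type} (n : Nat) (x : β) :
    x :: List.replicate n x = List.replicate n x ++ [x] := by
  rw [← List.replicate_succ, List.replicate_succ']

theorem foldl_append_replicate {α β : Type} (l : List α) (x : β) :
    ∀ acc : List β, l.foldl (fun a _ => a ++ [x]) acc = acc ++ List.replicate l.length x := by
  induction l with
  | nil => intro acc; simp
  | cons hd tl ih =>
    intro acc
    rw [List.foldl_cons, ih (acc ++ [x]), List.append_assoc, List.singleton_append,
      cons_replicate_eq, List.length_cons, List.replicate_succ']

theorem entry_eq_getElem (m : List (List Int)) (r c : Nat) (hr : r < m.length)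
    (hc : c < m[r].length) : entry m r c = m[r][c] := by
  rw [entry, List.getD_eq_getElem m [] hr, List.getD_eq_getElem _ 0 hc]

theorem entry_replicate (sN r c : Nat) (hr : r < sN) :
    entry (List.replicate sN (List.replicate sN (0 : Int))) r c = 0 := by
  rw [entry, List.getD_eq_getElem _ [] (by simpa using hr)]
  simp

theorem pvVal_eq_cond (maze : List (List (Int × Int))) (r c : Nat) :
    (if c / 2 < (maze.getD (r / 2) []).length ∧
        parityCond ((maze.getD (r / 2) []).getD (c / 2) (0, 0)) r c
      then (1 : Int) else 0) = pvVal maze r c := by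
  cases hcell : (maze.getD (r / 2) [])[c / 2]? with
  | none =>
    have hge : (maze.getD (r / 2) []).length ≤ c / 2 := by
      simpa using List.getElem?_eq_none_iff.mp hcell
    simp only [pvVal, hcell, parityCond]
    split_ifs <;> first | rfl | (exfalso; omega)
  | some cell =>
    obtain ⟨hlt, hEq⟩ := List.getElem?_eq_some_iff.mp hcell
    have hgd : (maze.getD (r / 2) []).getD (c / 2) (0, 0) = cell := by
      rw [List.getD_eq_getElem _ _ hlt, hEq]
    rw [hgd]
    simp only [pvVal, hcell, parityCond]
    split_ifs <;> first | rfl | (exfalso; omega)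

-- ===== VERDICT (by name: the statement is the Claim_ definition above) =====
theorem transform_maze_spec : Claim_equal_transform_maze := by
  intro maze _ _
  unfold Spec_transform_maze
  by_cases h0 : maze.length = 0
  · have hnil : maze = [] := List.length_eq_zero_iff.mp h0
    subst hnil
    decide
  · have hn : 1 ≤ maze.length := by omega
    have hs : ((maze.length : Int) * 2 - 1) = ((2 * maze.length - 1 : Nat) : Int) := by omega
    have hinit : (PySem.List.pyRange 0 ((2 * maze.length - 1 : Nat) : Int) 1).foldl
        (fun acc _ => acc ++ [List.replicate (2 * maze.length - 1) (0 : Int)]) [] =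
        List.replicate (2 * maze.length - 1) (List.replicate (2 * maze.length - 1) 0) := by
      rw [foldl_append_replicate, PySem.List.length_pyRange_one, List.nil_append]
      simp
    have hA : transform_maze maze = (PySem.List.enumerate maze).foldl
        (fun nm q => (PySem.List.enumerate q.2).foldl
          (stepCell ((2 * maze.length - 1 : Nat) : Int) q.1) nm)
        (List.replicate (2 * maze.length - 1) (List.replicate (2 * maze.length - 1) 0)) := by
      simp only [transform_maze, hs, Int.toNat_natCast, hinit]
    have hrepl : ∀ x ∈ List.replicate (2 * maze.length - 1)
        (List.replicate (2 * maze.length - 1) (0 : Int)), x.length = 2 * maze.length - 1 := by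
      intro x hx
      rw [List.eq_of_mem_replicate hx]
      simp
    have houterpres : ∀ (nm : List (List Int)) (q : Int × List (Int × Int)),
        ((PySem.List.enumerate q.2).foldl
            (stepCell ((2 * maze.length - 1 : Nat) : Int) q.1) nm).length = nm.length ∧
          ((∀ x ∈ nm, x.length = 2 * maze.length - 1) →
            ∀ x ∈ (PySem.List.enumerate q.2).foldl
              (stepCell ((2 * maze.length - 1 : Nat) : Int) q.1) nm,
              x.length = 2 * maze.length - 1) := by
      intro nm q
      exact foldl_shape _ (2 * maze.length - 1)
        (fun nm b => ⟨length_stepCell _ _ _ _, rows_stepCell _ _ _ _ _⟩) _ nm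
    have hshapeA := foldl_shape _ (2 * maze.length - 1) houterpres
      (PySem.List.enumerate maze)
      (List.replicate (2 * maze.length - 1) (List.replicate (2 * maze.length - 1) 0))
    have hAlen : (transform_maze maze).length = 2 * maze.length - 1 := by
      rw [hA, hshapeA.1]
      simp
    have hArows : ∀ x ∈ transform_maze maze, x.length = 2 * maze.length - 1 := by
      rw [hA]
      exact hshapeA.2 hrepl
    have hentryA : ∀ r c : Nat, r < 2 * maze.length - 1 → c < 2 * maze.length - 1 →
        entry (transform_maze maze) r c =
          if c / 2 < (maze.getD (r / 2) []).length ∧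
              parityCond ((maze.getD (r / 2) []).getD (c / 2) (0, 0)) r c
          then 1 else 0 := by
      intro r c hr hc
      have houter := outer_entry (2 * maze.length - 1) maze 0
        (List.replicate (2 * maze.length - 1) (List.replicate (2 * maze.length - 1) 0))
        (by simp) hrepl r c hr hc
      simp only [Nat.cast_zero, Nat.zero_le, true_and, Nat.sub_zero, Nat.zero_add] at houter
      rw [hA, houter, entry_replicate _ _ _ hr]
      have hrlt : r / 2 < maze.length := by omega
      by_cases hcond : c / 2 < (maze.getD (r / 2) []).length ∧
          parityCond ((maze.getD (r / 2) []).getD (c / 2) (0, 0)) r c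
      · rw [if_pos ⟨hrlt, hcond⟩, if_pos hcond]
      · rw [if_neg (by rintro ⟨_, h⟩; exact hcond h), if_neg hcond]
    have hBlen : (transform_maze_alt maze).length = 2 * maze.length - 1 := by
      simp [transform_maze_alt]
    apply List.ext_getElem (by rw [hAlen, hBlen])
    intro r hr1 hr2
    have hr : r < 2 * maze.length - 1 := by omega
    have hBrow : (transform_maze_alt maze)[r] =
        (List.range (2 * maze.length - 1)).map (fun c => pvVal maze r c) := by
      simp [transform_maze_alt]
    have hArlen : (transform_maze maze)[r].length = 2 * maze.length - 1 :=
      hArows _ (List.getElem_mem hr1)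
    apply List.ext_getElem (by rw [hArlen, hBrow]; simp)
    intro c hc1 hc2
    have hc : c < 2 * maze.length - 1 := by omega
    rw [← entry_eq_getElem _ r c hr1 hc1, hentryA r c hr hc, pvVal_eq_cond]
    have : (transform_maze_alt maze)[r][c] = pvVal maze r c := by
      simp [transform_maze_alt]
    rw [this]

theorem transform_maze_raises : Claim_raises_transform_maze := by
  unfold Claim_raises_transform_maze
  refine ⟨?_, by decide⟩
  rintro maze _ ⟨row, hrow, p, hp, hne⟩ hPre
  exact hne (hPre row hrow p hp)

-- self-check: the stated raise witness indeed lies inside the raise region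
theorem pvRaiseWitness_in_region_ok : Raises_transform_maze pvRaiseWitness_transform_maze :=
  transform_maze_raises.2.2.1
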